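-- pv_equiv track=rewrite | github.com/k1monfared/persian_music_abstraction | scripts/convert_radif.py | _split_dp
-- ===== SOURCE A (Python) =====
-- def _split_dp(
--     intervals: list[int],
--     pos: int,
--     memo: dict,
-- ) -> tuple[list[list[int]], list[int]] | None:
--     """Recursive DP for splitting intervals into dangs + gaps."""
--     if pos >= len(intervals):
--         return [], []
--     if pos in memo:
--         return memo[pos]
--
--     best_result = None
--     best_dang_count = -1
--
--     # Try dang lengths 3 and 4
--     for dang_len in (3, 4):
--         if pos + dang_len > len(intervals):
--             continue
--         dang = intervals[pos:pos + dang_len]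
--         dang_sum = sum(dang)
--         if not (9 <= dang_sum <= 11):
--             continue
--
--         # After the dang, try gap of 0 or 1 interval
--         for gap_len in (0, 1):
--             next_pos = pos + dang_len + gap_len
--             if gap_len > 0 and pos + dang_len + gap_len > len(intervals):
--                 continue
--
--             gap_val = intervals[pos + dang_len] if gap_len == 1 else 0
--
--             rest = _split_dp(intervals, next_pos, memo)
--             if rest is not None:
--                 rest_dangs, rest_gaps = rest
--                 total_dangs = 1 + len(rest_dangs)
--                 if total_dangs > best_dang_count:
--                     best_dang_count = total_dangs
--                     all_dangs = [dang] + rest_dangs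
--                     all_gaps = ([gap_val] + rest_gaps) if rest_dangs else []
--                     best_result = (all_dangs, all_gaps)
--             elif next_pos >= len(intervals):
--                 # This dang consumes everything
--                 if 1 > best_dang_count:
--                     best_dang_count = 1
--                     best_result = ([dang], [])
--
--     # Also try: skip this interval as a leading gap (only at start or after another gap)
--     # This handles cases where the sequence starts with a gap interval
--
--     memo[pos] = best_result
--     return best_result
-- ===== SOURCE B (Python) =====
-- def _split_dp(
--     intervals: list[int],
--     pos: int,
--     memo: dict,
-- ) -> tuple[list[list[int]], list[int]] | None:
--     """Bottom-up tabulation: fill a table from the end of `intervals` down to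
--     `pos`, consulting `memo` entries where present. Does not mutate `memo`."""
--     n = len(intervals)
--     if pos >= n:
--         return [], []
--     dp = {}
--     p = n - 1
--     while p >= pos:
--         if p in memo:
--             dp[p] = memo[p]
--         else:
--             best = None
--             best_count = -1
--             for dl in (3, 4):
--                 if p + dl > n:
--                     continue
--                 dang = intervals[p:p + dl]
--                 s = sum(dang)
--                 if not (9 <= s <= 11):
--                     continue
--                 for gl in (0, 1):
--                     nxt = p + dl + gl
--                     if gl and nxt > n:
--                         continue
--                     rest = ([], []) if nxt >= n else dp[nxt]
--                     if rest is None: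
--                         continue
--                     rd, rg = rest
--                     if 1 + len(rd) > best_count:
--                         best_count = 1 + len(rd)
--                         gv = intervals[p + dl] if gl else 0
--                         best = ([dang] + rd, [gv] + rg if rd else [])
--             dp[p] = best
--         p -= 1
--     return dp[pos]
-- ===== Notes on version B (the rewrite author's own statement) =====
-- stated objective: alternative
-- what changed: A's top-down memoized recursion is replaced by an explicit bottom-up tabulation: B fills a table from the end of the intervals down to pos with a while loop (consulting the supplied memo entries where present) and returns the table entry at pos; B does not mutate memo.
-- outside the precondition, e.g. on _split_dp([74, 4], -2147483648, {}): A returns None, B does not finish within the time limit; on _split_dp([4, 3, 4], -3, {}): A returns None, B returns None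
import Mathlib
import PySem

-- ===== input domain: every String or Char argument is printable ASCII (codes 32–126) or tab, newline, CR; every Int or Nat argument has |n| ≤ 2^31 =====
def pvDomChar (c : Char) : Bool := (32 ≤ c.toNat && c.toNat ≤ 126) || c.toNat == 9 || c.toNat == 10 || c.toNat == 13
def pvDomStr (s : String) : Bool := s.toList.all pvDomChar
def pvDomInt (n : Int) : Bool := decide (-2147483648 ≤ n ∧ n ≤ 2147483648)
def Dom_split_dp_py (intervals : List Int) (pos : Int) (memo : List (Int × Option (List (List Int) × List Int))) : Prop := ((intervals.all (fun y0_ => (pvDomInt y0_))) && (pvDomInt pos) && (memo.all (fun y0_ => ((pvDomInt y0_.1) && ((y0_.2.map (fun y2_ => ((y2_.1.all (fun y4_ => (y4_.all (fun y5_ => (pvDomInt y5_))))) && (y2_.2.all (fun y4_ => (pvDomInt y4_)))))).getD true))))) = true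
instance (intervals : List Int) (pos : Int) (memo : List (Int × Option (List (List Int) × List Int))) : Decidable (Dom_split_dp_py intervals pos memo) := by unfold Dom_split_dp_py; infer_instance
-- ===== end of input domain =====

-- B replaces A's memoized top-down recursion by an explicit bottom-up tabulation (same values;
-- A mutates `memo` in place, B does not — the equivalence proved here is about the return value only).

abbrev pvR : Type := List (List Int) × List Int
abbrev pvMemo : Type := PySem.Dict Int (Option pvR)

-- ===== PORT A =====
-- A's best/count update for one (dang, gap) candidate (the body of A's inner `if`s, shared by both loop turns);
-- state is (best_result, best_dang_count).
def pvUpd (n : Int) (dang : List Int) (gv nxt : Int) (rest : Option pvR) (st : Option pvR × Int) : Option pvR × Int :=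
  match rest with
  | some (rd, rg) =>
      if 1 + (rd.length : Int) > st.2 then
        (some (dang :: rd, if rd.isEmpty then [] else gv :: rg), 1 + (rd.length : Int))
      else st
  | none =>
      if nxt ≥ n then (if 1 > st.2 then (some ([dang], []), 1) else st) else st

-- A's recursion, threading the mutated memo dict; the two dang lengths (3, 4) and two gap
-- lengths (0, 1) of A's constant `for` tuples are unrolled in A's order.
def pvGoA (intervals : List Int) : Nat → Int → pvMemo → Option pvR × pvMemo
  | 0, pos, m =>   -- gas exhausted: unreachable, the top-level call supplies gas = (len - pos).toNat
    if pos ≥ (intervals.length : Int) then (some ([], []), m) else (none, m)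
  | gas + 1, pos, m =>
    if pos ≥ (intervals.length : Int) then (some ([], []), m)
    else
    match m.get? pos with
    | some v => (v, m)
    | none =>
      let st : Option pvR × Int × pvMemo := (none, -1, m)
      -- dang_len = 3
      let st :=
        if pos + 3 > (intervals.length : Int) then st else
        let dang := PySem.List.slice intervals (some pos) (some (pos + 3))
        let s := dang.sum
        if ¬ (9 ≤ s ∧ s ≤ 11) then st else
          let r0 := pvGoA intervals gas (pos + 3) st.2.2
          let b0 := pvUpd (intervals.length : Int) dang 0 (pos + 3) r0.1 (st.1, st.2.1)
          let st := (b0.1, b0.2, r0.2)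
          if pos + 3 + 1 > (intervals.length : Int) then st else
          let gv := (PySem.List.pyGet? intervals (pos + 3)).getD 0   -- index in range whenever reached (Pre_)
          let r1 := pvGoA intervals gas (pos + 3 + 1) st.2.2
          let b1 := pvUpd (intervals.length : Int) dang gv (pos + 3 + 1) r1.1 (st.1, st.2.1)
          (b1.1, b1.2, r1.2)
      -- dang_len = 4
      let st :=
        if pos + 4 > (intervals.length : Int) then st else
        let dang := PySem.List.slice intervals (some pos) (some (pos + 4))
        let s := dang.sum
        if ¬ (9 ≤ s ∧ s ≤ 11) then st else
          let r0 := pvGoA intervals gas (pos + 4) st.2.2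
          let b0 := pvUpd (intervals.length : Int) dang 0 (pos + 4) r0.1 (st.1, st.2.1)
          let st := (b0.1, b0.2, r0.2)
          if pos + 4 + 1 > (intervals.length : Int) then st else
          let gv := (PySem.List.pyGet? intervals (pos + 4)).getD 0
          let r1 := pvGoA intervals gas (pos + 4 + 1) st.2.2
          let b1 := pvUpd (intervals.length : Int) dang gv (pos + 4 + 1) r1.1 (st.1, st.2.1)
          (b1.1, b1.2, r1.2)
      (st.1, st.2.2.insert pos st.1)

def split_dp_py (intervals : List Int) (pos : Int) (memo : List (Int × Option (List (List Int) × List Int))) : Option (List (List Int) × List Int) :=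
  (pvGoA intervals ((intervals.length : Int) - pos).toNat pos (PySem.Dict.mk memo)).1

-- ===== PORT B =====
-- B's best/count update for one candidate (the body of B's inner `if`; `continue` on rest None)
def pvUpdB (dang : List Int) (gv : Int) (rest : Option pvR) (st : Option pvR × Int) : Option pvR × Int :=
  match rest with
  | none => st
  | some (rd, rg) =>
      if 1 + (rd.length : Int) > st.2 then
        (some (dang :: rd, if rd.isEmpty then [] else gv :: rg), 1 + (rd.length : Int))
      else st

-- best candidate at position p, reading already-tabulated positions from dp (B's inner double
-- loop over the constant tuples (3, 4) and (0, 1), unrolled in B's order)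
def pvBest (intervals : List Int) (n : Int) (dp : pvMemo) (p : Int) : Option pvR :=
  let st : Option pvR × Int := (none, -1)
  -- dl = 3
  let st :=
    if p + 3 > n then st else
    let dang := PySem.List.slice intervals (some p) (some (p + 3))
    let s := dang.sum
    if ¬ (9 ≤ s ∧ s ≤ 11) then st else
      -- dp[nxt] is always present when nxt < n (loop order); getD totalizes the KeyError
      let r0 := if p + 3 ≥ n then some (([], []) : pvR) else (dp.get? (p + 3)).getD none
      let st := pvUpdB dang 0 r0 st
      if p + 3 + 1 > n then st else
      let r1 := if p + 3 + 1 ≥ n then some (([], []) : pvR) else (dp.get? (p + 3 + 1)).getD none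
      pvUpdB dang ((PySem.List.pyGet? intervals (p + 3)).getD 0) r1 st
  -- dl = 4
  let st :=
    if p + 4 > n then st else
    let dang := PySem.List.slice intervals (some p) (some (p + 4))
    let s := dang.sum
    if ¬ (9 ≤ s ∧ s ≤ 11) then st else
      let r0 := if p + 4 ≥ n then some (([], []) : pvR) else (dp.get? (p + 4)).getD none
      let st := pvUpdB dang 0 r0 st
      if p + 4 + 1 > n then st else
      let r1 := if p + 4 + 1 ≥ n then some (([], []) : pvR) else (dp.get? (p + 4 + 1)).getD none
      pvUpdB dang ((PySem.List.pyGet? intervals (p + 4)).getD 0) r1 st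
  st.1

-- B's `while p >= pos` loop, filling dp from n-1 down to pos
def pvLoopB (intervals : List Int) (memo : pvMemo) (n pos : Int) : Nat → Int → pvMemo → pvMemo
  | 0, _, dp => dp   -- unreachable: the caller supplies gas = the exact number of loop turns
  | gas + 1, p, dp =>
    if p < pos then dp
    else
      let v := match memo.get? p with
        | some v => v
        | none => pvBest intervals n dp p
      pvLoopB intervals memo n pos gas (p - 1) (dp.insert p v)

def split_dp_py_alt (intervals : List Int) (pos : Int) (memo : List (Int × Option (List (List Int) × List Int))) : Option (List (List Int) × List Int) :=
  let n : Int := intervals.length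
  if pos ≥ n then some ([], [])
  else
    let dp := pvLoopB intervals (PySem.Dict.mk memo) n pos ((n - 1) - pos + 1).toNat (n - 1) PySem.Dict.empty
    (dp.get? pos).getD none   -- dp[pos] always present here; getD totalizes the KeyError

-- ===== PRECONDITION & SPEC =====
-- Pre_ excludes negative pos (pos is a position into intervals): there A's slices rely on Python's
-- negative-index wraparound (an accident of the representation), sufficiently negative pos on longer inputs
-- makes A exceed the recursion limit and raise RecursionError, and B's bottom-up table would sweep the whole
-- range n-1 .. pos (for pos near -2^31 B does not finish where A's shallow failure returns None quickly).
def Pre_split_dp_py (_intervals : List Int) (pos : Int) (_memo : List (Int × Option (List (List Int) × List Int))) : Prop := 0 ≤ pos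
instance (intervals : List Int) (pos : Int) (memo : List (Int × Option (List (List Int) × List Int))) : Decidable (Pre_split_dp_py intervals pos memo) := by unfold Pre_split_dp_py; infer_instance

def pvWitness_split_dp_py : List Int × Int × (List (Int × Option (List (List Int) × List Int))) := ([4, 3, 4, 2, 4, 3, 4], 0, [(3, some ([[2, 4, 3]], []))])

def Spec_split_dp_py (intervals : List Int) (pos : Int) (memo : List (Int × Option (List (List Int) × List Int))) (out : Option (List (List Int) × List Int)) : Prop := out = split_dp_py_alt intervals pos memo
instance (intervals : List Int) (pos : Int) (memo : List (Int × Option (List (List Int) × List Int))) (out : Option (List (List Int) × List Int)) : Decidable (Spec_split_dp_py intervals pos memo out) := by unfold Spec_split_dp_py; infer_instance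

-- ===== CLAIM (what is proved, stated in full; the proofs are below) =====
def Claim_equal_split_dp_py : Prop := ∀ (intervals : List Int) (pos : Int) (memo : List (Int × Option (List (List Int) × List Int))), Dom_split_dp_py intervals pos memo → Pre_split_dp_py intervals pos memo → Spec_split_dp_py intervals pos memo (split_dp_py intervals pos memo)

-- ===== LEMMAS AND PROOFS =====

-- the memoless value of A's recursion (reference recurrence for both proofs)
def pvF (intervals : List Int) (memo : pvMemo) (pos : Int) : Option pvR :=
  if _hbase : pos ≥ (intervals.length : Int) then some ([], [])
  else
    match memo.get? pos with
    | some v => v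
    | none =>
      let st : Option pvR × Int := (none, -1)
      let st :=
        if pos + 3 > (intervals.length : Int) then st else
        let dang := PySem.List.slice intervals (some pos) (some (pos + 3))
        let s := dang.sum
        if ¬ (9 ≤ s ∧ s ≤ 11) then st else
          let st := pvUpd (intervals.length : Int) dang 0 (pos + 3) (pvF intervals memo (pos + 3)) st
          if pos + 3 + 1 > (intervals.length : Int) then st else
          pvUpd (intervals.length : Int) dang ((PySem.List.pyGet? intervals (pos + 3)).getD 0) (pos + 3 + 1) (pvF intervals memo (pos + 3 + 1)) st
      let st :=
        if pos + 4 > (intervals.length : Int) then st else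
        let dang := PySem.List.slice intervals (some pos) (some (pos + 4))
        let s := dang.sum
        if ¬ (9 ≤ s ∧ s ≤ 11) then st else
          let st := pvUpd (intervals.length : Int) dang 0 (pos + 4) (pvF intervals memo (pos + 4)) st
          if pos + 4 + 1 > (intervals.length : Int) then st else
          pvUpd (intervals.length : Int) dang ((PySem.List.pyGet? intervals (pos + 4)).getD 0) (pos + 4 + 1) (pvF intervals memo (pos + 4 + 1)) st
      st.1
termination_by ((intervals.length : Int) - pos).toNat
decreasing_by all_goals (rw [not_le] at _hbase; omega)

-- the memo A threads stays coherent with the original memo and pvF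
def pvAgrees (intervals : List Int) (memo m : pvMemo) : Prop :=
  ∀ q : Int, m.get? q = memo.get? q ∨ (memo.get? q = none ∧ m.get? q = some (pvF intervals memo q))

theorem pvF_base (intervals : List Int) (memo : pvMemo) (q : Int) (h : q ≥ (intervals.length : Int)) :
    pvF intervals memo q = some ([], []) := by
  rw [pvF]; simp [h]

theorem pvStep_eq (n : Int) (dang : List Int) (gv nxt : Int) (r : Option pvR) (st : Option pvR × Int)
    (h : nxt ≥ n → r = some ([], [])) :
    pvUpdB dang gv r st = pvUpd n dang gv nxt r st := by
  cases r with
  | some v => rfl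
  | none =>
    by_cases hn : nxt ≥ n
    · exact absurd (h hn) (by simp)
    · simp [pvUpd, pvUpdB, hn]

theorem pvBest_eq (intervals : List Int) (memo : pvMemo) (dp : pvMemo) (p : Int)
    (hdp : ∀ q, p < q → q < (intervals.length : Int) → dp.get? q = some (pvF intervals memo q))
    (hm : memo.get? p = none) (hp : p < (intervals.length : Int)) :
    pvBest intervals (intervals.length : Int) dp p = pvF intervals memo p := by
  have hrest : ∀ nxt : Int, p < nxt →
      (if nxt ≥ (intervals.length : Int) then some (([], []) : pvR) else (dp.get? nxt).getD none)
        = pvF intervals memo nxt := by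
    intro nxt hlt
    by_cases hn : nxt ≥ (intervals.length : Int)
    · simp [hn, pvF_base intervals memo nxt hn]
    · simp [hn, hdp nxt hlt (by omega)]
  rw [pvBest, pvF, dif_neg (not_le.mpr hp)]
  simp only [hm]
  rw [hrest (p + 3) (by omega), hrest (p + 3 + 1) (by omega),
      hrest (p + 4) (by omega), hrest (p + 4 + 1) (by omega)]
  rw [pvStep_eq (intervals.length : Int) _ 0 (p + 3) _ _ (fun h => pvF_base intervals memo _ h),
      pvStep_eq (intervals.length : Int) _ _ (p + 3 + 1) _ _ (fun h => pvF_base intervals memo _ h),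
      pvStep_eq (intervals.length : Int) _ 0 (p + 4) _ _ (fun h => pvF_base intervals memo _ h),
      pvStep_eq (intervals.length : Int) _ _ (p + 4 + 1) _ _ (fun h => pvF_base intervals memo _ h)]

theorem pvLoopB_get (intervals : List Int) (memo : pvMemo) (pos : Int) :
    ∀ (gas : Nat) (p : Int) (dp : pvMemo), (p - pos + 1).toNat ≤ gas →
      (∀ q, p < q → q < (intervals.length : Int) → dp.get? q = some (pvF intervals memo q)) →
      ∀ q, pos ≤ q → q < (intervals.length : Int) →
        (pvLoopB intervals memo (intervals.length : Int) pos gas p dp).get? q = some (pvF intervals memo q) := by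
  intro gas
  induction gas with
  | zero =>
    intro p dp hg hdp q hq1 hq2
    rw [pvLoopB]
    exact hdp q (by omega) hq2
  | succ g ih =>
    intro p dp hg hdp q hq1 hq2
    rw [pvLoopB]
    by_cases hp : p < pos
    · rw [if_pos hp]
      exact hdp q (by omega) hq2
    · rw [if_neg hp]
      refine ih (p - 1) _ (by omega) (fun q' hq1' hq2' => ?_) q hq1 hq2
      by_cases hqp : q' = p
      · subst hqp
        rw [PySem.Dict.get?_insert_self]
        cases hmp : PySem.Dict.get? memo q' with
        | some w => rw [pvF, dif_neg (not_le.mpr hq2'), hmp]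
        | none => rw [pvBest_eq intervals memo dp q' hdp hmp hq2']
      · rw [PySem.Dict.get?_insert_of_ne _ _ hqp]
        exact hdp q' (by omega) hq2'

theorem pvAgrees_insert (intervals : List Int) (memo mcur : pvMemo) (pos : Int) (v : Option pvR)
    (hag : pvAgrees intervals memo mcur) (hmemo : memo.get? pos = none)
    (hv : v = pvF intervals memo pos) :
    pvAgrees intervals memo (mcur.insert pos v) := by
  intro q
  by_cases hq : q = pos
  · subst hq
    exact Or.inr ⟨hmemo, by rw [PySem.Dict.get?_insert_self, hv]⟩
  · rw [PySem.Dict.get?_insert_of_ne _ _ hq]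
    exact hag q

theorem pvGoA_fuel (intervals : List Int) (memo : pvMemo) :
    ∀ (gas : Nat) (pos : Int) (m : pvMemo), ((intervals.length : Int) - pos).toNat ≤ gas →
      pvAgrees intervals memo m →
      (pvGoA intervals gas pos m).1 = pvF intervals memo pos ∧
        pvAgrees intervals memo (pvGoA intervals gas pos m).2 := by
  intro gas
  induction gas with
  | zero =>
    intro pos m hk hag
    have hbase : pos ≥ (intervals.length : Int) := by omega
    rw [pvGoA, if_pos hbase]
    exact ⟨(pvF_base intervals memo pos hbase).symm, hag⟩
  | succ k ih =>
    intro pos m hk hag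
    by_cases hbase : pos ≥ (intervals.length : Int)
    · rw [pvGoA, if_pos hbase]
      exact ⟨(pvF_base intervals memo pos hbase).symm, hag⟩
    · have hpos : pos < (intervals.length : Int) := lt_of_not_ge hbase
      have hrec : ∀ (p' : Int) (m' : pvMemo), pos < p' → pvAgrees intervals memo m' →
          (pvGoA intervals k p' m').1 = pvF intervals memo p' ∧
            pvAgrees intervals memo (pvGoA intervals k p' m').2 :=
        fun p' m' hp' hag' => ih p' m' (by omega) hag'
      rw [pvGoA, if_neg hbase]
      cases hm : PySem.Dict.get? m pos with
      | some v =>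
        rcases hag pos with hE | ⟨hn, hs⟩
        · have hmemo : PySem.Dict.get? memo pos = some v := by rw [← hE, hm]
          refine ⟨?_, hag⟩
          rw [pvF, dif_neg hbase]
          simp only [hmemo]
        · rw [hm] at hs
          refine ⟨?_, hag⟩
          simp only [Option.some.injEq] at hs
          exact hs
      | none =>
        have hmemo : PySem.Dict.get? memo pos = none := by
          rcases hag pos with hE | ⟨hn, _⟩
          · rw [← hE, hm]
          · exact hn
        by_cases c3 : pos + 3 > (intervals.length : Int)
        · have h4 := hrec (pos + 4) m (by omega) hag
          have h41 := hrec (pos + 4 + 1) (pvGoA intervals k (pos + 4) m).2 (by omega) h4.2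
          simp only [if_pos c3]
          rw [h4.1, h41.1]
          refine ⟨?_, pvAgrees_insert _ _ _ _ _ ?_ hmemo ?_⟩
          · conv_rhs => rw [pvF]
            rw [dif_neg hbase]
            simp only [hmemo, if_pos c3]
            split_ifs <;> rfl
          · split_ifs <;> first | exact hag | exact h4.2 | exact h41.2
          · conv_rhs => rw [pvF]
            rw [dif_neg hbase]
            simp only [hmemo, if_pos c3]
            split_ifs <;> rfl
        · by_cases s3 : 9 ≤ (PySem.List.slice intervals (some pos) (some (pos + 3))).sum ∧
              (PySem.List.slice intervals (some pos) (some (pos + 3))).sum ≤ 11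
          · by_cases g3 : pos + 3 + 1 > (intervals.length : Int)
            · have h3 := hrec (pos + 3) m (by omega) hag
              have h4 := hrec (pos + 4) (pvGoA intervals k (pos + 3) m).2 (by omega) h3.2
              have h41 := hrec (pos + 4 + 1) (pvGoA intervals k (pos + 4) (pvGoA intervals k (pos + 3) m).2).2 (by omega) h4.2
              simp only [if_neg c3, if_neg (not_not_intro s3), if_pos g3]
              rw [h3.1, h4.1, h41.1]
              refine ⟨?_, pvAgrees_insert _ _ _ _ _ ?_ hmemo ?_⟩
              · conv_rhs => rw [pvF]
                rw [dif_neg hbase]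
                simp only [hmemo, if_neg c3, if_neg (not_not_intro s3), if_pos g3]
                split_ifs <;> rfl
              · split_ifs <;> first | exact h3.2 | exact h4.2 | exact h41.2
              · conv_rhs => rw [pvF]
                rw [dif_neg hbase]
                simp only [hmemo, if_neg c3, if_neg (not_not_intro s3), if_pos g3]
                split_ifs <;> rfl
            · have h3 := hrec (pos + 3) m (by omega) hag
              have h31 := hrec (pos + 3 + 1) (pvGoA intervals k (pos + 3) m).2 (by omega) h3.2
              have h4 := hrec (pos + 4) (pvGoA intervals k (pos + 3 + 1) (pvGoA intervals k (pos + 3) m).2).2 (by omega) h31.2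
              have h41 := hrec (pos + 4 + 1) (pvGoA intervals k (pos + 4) (pvGoA intervals k (pos + 3 + 1) (pvGoA intervals k (pos + 3) m).2).2).2 (by omega) h4.2
              simp only [if_neg c3, if_neg (not_not_intro s3), if_neg g3]
              rw [h3.1, h31.1, h4.1, h41.1]
              refine ⟨?_, pvAgrees_insert _ _ _ _ _ ?_ hmemo ?_⟩
              · conv_rhs => rw [pvF]
                rw [dif_neg hbase]
                simp only [hmemo, if_neg c3, if_neg (not_not_intro s3), if_neg g3]
                split_ifs <;> rfl
              · split_ifs <;> first | exact h31.2 | exact h4.2 | exact h41.2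
              · conv_rhs => rw [pvF]
                rw [dif_neg hbase]
                simp only [hmemo, if_neg c3, if_neg (not_not_intro s3), if_neg g3]
                split_ifs <;> rfl
          · have h4 := hrec (pos + 4) m (by omega) hag
            have h41 := hrec (pos + 4 + 1) (pvGoA intervals k (pos + 4) m).2 (by omega) h4.2
            simp only [if_neg c3, if_pos s3]
            rw [h4.1, h41.1]
            refine ⟨?_, pvAgrees_insert _ _ _ _ _ ?_ hmemo ?_⟩
            · conv_rhs => rw [pvF]
              rw [dif_neg hbase]
              simp only [hmemo, if_neg c3, if_pos s3]
              split_ifs <;> rfl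
            · split_ifs <;> first | exact hag | exact h4.2 | exact h41.2
            · conv_rhs => rw [pvF]
              rw [dif_neg hbase]
              simp only [hmemo, if_neg c3, if_pos s3]
              split_ifs <;> rfl

-- A's top-level result is the memoless recurrence pvF
theorem pvGoA_spec (intervals : List Int) (memo : pvMemo) (pos : Int) (m : pvMemo)
    (hag : pvAgrees intervals memo m) :
    (pvGoA intervals (((intervals.length : Int) - pos).toNat) pos m).1 = pvF intervals memo pos ∧
      pvAgrees intervals memo (pvGoA intervals (((intervals.length : Int) - pos).toNat) pos m).2 :=
  pvGoA_fuel intervals memo (((intervals.length : Int) - pos).toNat) pos m le_rfl hag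

-- ===== VERDICT (by name: the statement is the Claim_ definition above) =====
theorem split_dp_py_spec : Claim_equal_split_dp_py := by
  intro intervals pos memo _hdom _hpre
  unfold Spec_split_dp_py split_dp_py split_dp_py_alt
  have hF : (pvGoA intervals (((intervals.length : Int) - pos).toNat) pos (PySem.Dict.mk memo)).1 = pvF intervals (PySem.Dict.mk memo) pos :=
    (pvGoA_spec intervals (PySem.Dict.mk memo) pos (PySem.Dict.mk memo) (fun q => Or.inl rfl)).1
  rw [hF]
  by_cases hb : pos ≥ (intervals.length : Int)
  · simp only [if_pos hb]
    exact pvF_base intervals (PySem.Dict.mk memo) pos hb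
  · simp only [if_neg hb]
    rw [pvLoopB_get intervals (PySem.Dict.mk memo) pos ((((intervals.length : Int) - 1) - pos + 1).toNat) ((intervals.length : Int) - 1) PySem.Dict.empty le_rfl
      (fun q h1 h2 => by omega) pos le_rfl (by omega)]
    rfl
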